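-- pv_equiv track=rewrite | github.com/Ace1928/glyph_forge | src/ascii_forge/core/banner_generator.py | _add_emboss
-- ===== SOURCE A (Python) =====
-- def _add_emboss(text: str) -> str:
--     """Add an embossed 3D effect to text."""
--     lines = text.split('\n')
--     result = []
--
--     for i, line in enumerate(lines):
--         # Create a "highlight" by adding lighter characters on top
--         if i > 0 and i < len(lines):
--             # Add highlight to non-space characters
--             highlighted = ""
--             for j, char in enumerate(line):
--                 if char != ' ' and (j == 0 or line[j-1] == ' '):
--                     highlighted += '/'  # Highlight character
--                 else:
--                     highlighted += char
--             result.append(highlighted)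
--         else:
--             result.append(line)
--
--     return '\n'.join(result)
-- ===== SOURCE B (Python) =====
-- def _add_emboss(text: str) -> str:
--     """Add an embossed 3D effect to text (word-level rewrite)."""
--     lines = text.split('\n')
--     return '\n'.join(
--         line if i == 0 else
--         ' '.join(('/' + w[1:]) if w else w for w in line.split(' '))
--         for i, line in enumerate(lines)
--     )
-- ===== Notes on version B (the rewrite author's own statement) =====
-- stated objective: simpler
-- what changed: Replaces the character-by-character scan with previous-char lookback by a word-level pass: split each non-first line on single spaces, replace the first character of every non-empty token with a slash, and rejoin.
import Mathlib
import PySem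

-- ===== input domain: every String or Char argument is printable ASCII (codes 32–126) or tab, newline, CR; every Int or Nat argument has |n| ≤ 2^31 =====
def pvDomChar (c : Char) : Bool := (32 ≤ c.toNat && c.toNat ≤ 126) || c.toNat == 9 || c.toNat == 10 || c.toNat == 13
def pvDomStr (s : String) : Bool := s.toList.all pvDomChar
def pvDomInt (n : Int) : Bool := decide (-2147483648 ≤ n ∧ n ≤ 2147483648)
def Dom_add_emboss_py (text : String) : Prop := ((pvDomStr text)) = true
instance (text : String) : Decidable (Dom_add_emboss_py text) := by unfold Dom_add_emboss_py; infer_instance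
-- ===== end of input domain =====

-- B replaces A's character-by-character scan with previous-char lookback by a word-level
-- split/map/join pass over each non-first line; objective: simpler decomposition.

-- ===== PORT A =====
-- inner loop of A: for j, char in enumerate(line): …
def embossLineA (line : List Char) : List Char :=
  (PySem.List.enumerate line).foldl
    (fun highlighted p =>
      if p.2 ≠ ' ' ∧ (p.1 = 0 ∨ PySem.List.pyGet? line (p.1 - 1) = some ' ')
      then highlighted ++ ['/']
      else highlighted ++ [p.2]) []

def add_emboss_py (text : String) : String :=
  let lines := PySem.Chars.splitOn text.toList ['\n']
  let result := (PySem.List.enumerate lines).foldl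
    (fun result p =>
      if 0 < p.1 ∧ p.1 < (lines.length : Int)
      then result ++ [embossLineA p.2]
      else result ++ [p.2]) []
  String.ofList (PySem.Chars.join ['\n'] result)

-- ===== PORT B =====
-- ('/' + w[1:]) if w else w
def embossWord (w : List Char) : List Char :=
  match w with
  | [] => []
  | _ :: rest => '/' :: rest

def embossLineB (line : List Char) : List Char :=
  PySem.Chars.join [' '] ((List.splitOn ' ' line).map embossWord)

def add_emboss_py_alt (text : String) : String :=
  let lines := List.splitOn '\n' text.toList
  String.ofList (PySem.Chars.join ['\n']
    ((PySem.List.enumerate lines).map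
      (fun p => if p.1 = 0 then p.2 else embossLineB p.2)))

-- ===== PRECONDITION & SPEC =====
def Spec_add_emboss_py (text : String) (out : String) : Prop := out = add_emboss_py_alt text
instance (text : String) (out : String) : Decidable (Spec_add_emboss_py text out) := by unfold Spec_add_emboss_py; infer_instance

-- ===== CLAIM (what is proved, stated in full; the proofs are below) =====
def Claim_equal_add_emboss_py : Prop := ∀ (text : String), Dom_add_emboss_py text → Spec_add_emboss_py text (add_emboss_py text)

-- ===== LEMMAS AND PROOFS =====

-- Python's str.split with a one-char separator is Mathlib's List.splitOn.
theorem splitOn_go_single (c : Char) (fuel : Nat) :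
    ∀ (l cur : List Char) (acc : List (List Char)), l.length < fuel →
      PySem.Chars.splitOn.go [c] fuel l cur acc
        = acc.reverse ++ (List.splitOn c l).modifyHead (cur.reverse ++ ·) := by
  induction fuel with
  | zero => intro l cur acc h; omega
  | succ n ih =>
    intro l cur acc h
    cases l with
    | nil =>
      simp [PySem.Chars.splitOn.go, List.splitOn]
    | cons a rest =>
      by_cases hac : a = c
      · subst hac
        have hpre : List.isPrefixOf [a] (a :: rest) = true := by
          simp [List.isPrefixOf]
        rw [PySem.Chars.splitOn.go.eq_def]
        simp only [hpre, if_true, List.length_singleton, List.drop_succ_cons, List.drop_zero]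
        rw [ih rest [] (cur.reverse :: acc) (by simpa using Nat.lt_of_succ_lt_succ h)]
        have : List.splitOn a (a :: rest) = [] :: List.splitOn a rest := by
          simp [List.splitOn, List.splitOnP_cons]
        rw [this]
        simp [List.modifyHead]
        cases hsp : List.splitOn a rest with
        | nil => exact absurd hsp (by simp [List.splitOn]; exact List.splitOnP_ne_nil _ _)
        | cons w ws => simp [List.modifyHead]
      · have hpre : List.isPrefixOf [c] (a :: rest) = false := by
          simp [List.isPrefixOf]; exact fun h' => absurd h'.symm hac
        rw [PySem.Chars.splitOn.go.eq_def]
        simp only [hpre, Bool.false_eq_true, if_false]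
        rw [ih rest (a :: cur) acc (by simpa using Nat.lt_of_succ_lt_succ h)]
        have : List.splitOn c (a :: rest)
            = (List.splitOn c rest).modifyHead (List.cons a) := by
          simp [List.splitOn, List.splitOnP_cons, hac]
        rw [this, List.modifyHead_modifyHead]
        cases hsp : List.splitOn c rest with
        | nil => exact absurd hsp (by simp [List.splitOn]; exact List.splitOnP_ne_nil _ _)
        | cons w ws => simp [List.modifyHead]

theorem splitOn_single (s : List Char) (c : Char) :
    PySem.Chars.splitOn s [c] = List.splitOn c s := by
  unfold PySem.Chars.splitOn
  rw [splitOn_go_single c (s.length + 1) s [] [] (by omega)]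
  cases hsp : List.splitOn c s with
  | nil => exact absurd hsp (by simp [List.splitOn]; exact List.splitOnP_ne_nil _ _)
  | cons w ws => simp [List.modifyHead]

-- the simple state recursion both sides agree with: the flag says "at a word start"
def embAux : Bool → List Char → List Char
  | _, [] => []
  | b, c :: cs => (if c ≠ ' ' ∧ b = true then '/' else c) :: embAux (c == ' ') cs

def flagA (l : List Char) (k : Nat) : Bool :=
  k == 0 || (l[k - 1]? == some ' ')

theorem embossLineA_loop (l : List Char) :
    ∀ (s : List Char) (k : Nat) (acc : List Char), l.drop k = s →
      (PySem.List.enumerate s (k : Int)).foldl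
        (fun highlighted p =>
          if p.2 ≠ ' ' ∧ (p.1 = 0 ∨ PySem.List.pyGet? l (p.1 - 1) = some ' ')
          then highlighted ++ ['/']
          else highlighted ++ [p.2]) acc
      = acc ++ embAux (flagA l k) s := by
  intro s
  induction s with
  | nil => intro k acc _; simp [PySem.List.enumerate, embAux]
  | cons c s' ih =>
    intro k acc hdrop
    have hget : l[k]? = some c := by
      rw [← List.head?_drop, hdrop]; rfl
    have hdrop' : l.drop (k + 1) = s' := by
      have := congrArg List.tail hdrop
      simpa [List.tail_drop] using this
    rw [PySem.List.enumerate_cons]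
    simp only [List.foldl_cons]
    have hcast : ((k : Int) + 1) = ((k + 1 : Nat) : Int) := by push_cast; ring
    rw [hcast, ih (k + 1) _ hdrop']
    have hflag' : flagA l (k + 1) = (c == ' ') := by
      simp [flagA, hget]
    rw [hflag']
    have hcond : ((k : Int) = 0 ∨ PySem.List.pyGet? l ((k : Int) - 1) = some ' ')
        ↔ flagA l k = true := by
      cases k with
      | zero => simp [flagA]
      | succ m =>
        have : ((m + 1 : Nat) : Int) - 1 = (m : Int) := by push_cast; ring
        rw [this]
        simp [flagA, PySem.List.pyGet?_natCast]
        omega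
    rw [embAux]
    by_cases hc : c ≠ ' ' ∧ flagA l k = true
    · rw [if_pos ⟨hc.1, hcond.mpr hc.2⟩, if_pos hc]; simp
    · rw [if_neg (fun h => hc ⟨h.1, hcond.mp h.2⟩), if_neg hc]; simp

-- join-with-one-space in a shape convenient for induction
def joinSp : List (List Char) → List Char
  | [] => []
  | [w] => w
  | w :: ws => w ++ ' ' :: joinSp ws

theorem joinSp_eq_join (ps : List (List Char)) :
    joinSp ps = PySem.Chars.join [' '] ps := by
  induction ps with
  | nil => simp [joinSp, PySem.Chars.join, List.intercalate]
  | cons w ws ih =>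
    cases ws with
    | nil => simp [joinSp, PySem.Chars.join, List.intercalate]
    | cons v vs =>
      have hunf : joinSp (w :: v :: vs) = w ++ ' ' :: joinSp (v :: vs) := rfl
      rw [hunf, PySem.Chars.join_cons_cons, ← ih]
      simp

theorem joinSp_cons_head (a : Char) (w : List Char) (rest : List (List Char)) :
    joinSp ((a :: w) :: rest) = a :: joinSp (w :: rest) := by
  cases rest <;> simp [joinSp]

def mapEmb (b : Bool) : List (List Char) → List (List Char)
  | [] => []
  | w :: ws => (if b then embossWord w else w) :: ws.map embossWord

theorem embAux_eq_joinSp (l : List Char) :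
    ∀ b : Bool, embAux b l = joinSp (mapEmb b (List.splitOn ' ' l)) := by
  induction l with
  | nil => intro b; cases b <;> simp [embAux, mapEmb, joinSp, embossWord]
  | cons c cs ih =>
    intro b
    obtain ⟨w, ws, hsp⟩ : ∃ w ws, List.splitOn ' ' cs = w :: ws := by
      cases hsp : List.splitOn ' ' cs with
      | nil => exact absurd hsp (by simp [List.splitOn]; exact List.splitOnP_ne_nil _ _)
      | cons w ws => exact ⟨w, ws, rfl⟩
    by_cases hc : c = ' '
    · subst hc
      have hsplit : List.splitOn ' ' (' ' :: cs) = [] :: List.splitOn ' ' cs := by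
        simp [List.splitOn, List.splitOnP_cons]
      rw [hsplit, embAux, (by decide : (' ' == ' ') = true), ih true]
      cases b <;> simp [mapEmb, hsp, embossWord, joinSp_cons_head, joinSp]
    · have hsplit : List.splitOn ' ' (c :: cs)
          = (List.splitOn ' ' cs).modifyHead (List.cons c) := by
        simp [List.splitOn, List.splitOnP_cons, hc]
      rw [hsplit, hsp, List.modifyHead, embAux,
        (by simpa using hc : (c == ' ') = false), ih false, hsp]
      have hmapf : mapEmb false (w :: ws) = w :: ws.map embossWord := by
        simp [mapEmb]
      rw [hmapf]
      cases b with
      | false =>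
        simp only [mapEmb, if_neg (by simp : ¬False), Bool.false_eq_true, if_false]
        rw [if_neg (by simp [hc])]
        exact (joinSp_cons_head c w (ws.map embossWord)).symm
      | true =>
        simp only [mapEmb, if_pos rfl]
        rw [if_pos (by simp [hc]), embossWord]
        exact (joinSp_cons_head '/' w (ws.map embossWord)).symm

theorem embossLine_eq (l : List Char) : embossLineA l = embossLineB l := by
  obtain ⟨w, ws, hsp⟩ : ∃ w ws, List.splitOn ' ' l = w :: ws := by
    cases hsp : List.splitOn ' ' l with
    | nil => exact absurd hsp (by simp [List.splitOn]; exact List.splitOnP_ne_nil _ _)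
    | cons w ws => exact ⟨w, ws, rfl⟩
  have h1 : embossLineA l = embAux (flagA l 0) l := by
    have := embossLineA_loop l l 0 [] (by simp)
    simpa [embossLineA] using this
  rw [h1, (by simp [flagA] : flagA l 0 = true), embAux_eq_joinSp l true,
    embossLineB, joinSp_eq_join, hsp]
  simp [mapEmb, List.map]

theorem foldl_append_map {α β : Type} (f : α → β) (xs : List α) :
    ∀ acc : List β,
      xs.foldl (fun r p => r ++ [f p]) acc = acc ++ xs.map f := by
  induction xs with
  | nil => intro acc; simp
  | cons x xs ih => intro acc; simp [ih]

-- ===== VERDICT (by name: the statement is the Claim_ definition above) =====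
theorem add_emboss_py_spec : Claim_equal_add_emboss_py := by
  intro text _
  unfold Spec_add_emboss_py add_emboss_py add_emboss_py_alt
  simp only [splitOn_single]
  set lines := List.splitOn '\n' text.toList with hlines
  have hstep :
      (fun (result : List (List Char)) (p : Int × List Char) =>
        if 0 < p.1 ∧ p.1 < (lines.length : Int)
        then result ++ [embossLineA p.2]
        else result ++ [p.2])
      = (fun result p =>
          result ++ [if 0 < p.1 ∧ p.1 < (lines.length : Int) then embossLineA p.2 else p.2]) := by
    funext r p
    by_cases h : 0 < p.1 ∧ p.1 < (lines.length : Int) <;> simp [h]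
  rw [hstep, foldl_append_map
    (fun p : Int × List Char =>
      if 0 < p.1 ∧ p.1 < (lines.length : Int) then embossLineA p.2 else p.2)
    (PySem.List.enumerate lines) []]
  rw [List.nil_append]
  congr 1
  congr 1
  apply List.map_congr_left
  intro p hp
  obtain ⟨k, hk, rfl⟩ := (PySem.List.mem_enumerate_iff _ _ _).mp hp
  by_cases hk0 : k = 0
  · subst hk0; simp
  · have h1 : (0 : Int) < 0 + (k : Int) := by
      have : 0 < k := Nat.pos_of_ne_zero hk0
      omega
    have h2 : (0 : Int) + (k : Int) < (lines.length : Int) := by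
      have : (k : Int) < (lines.length : Int) := by exact_mod_cast hk
      omega
    rw [if_pos ⟨h1, h2⟩, if_neg (by omega), embossLine_eq]
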